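-- pv_equiv track=rewrite | github.com/tallyfy/migrator | typeform/src/transformers/user_transformer.py | _generate_subdomain
-- ===== SOURCE A (Python) =====
-- def _generate_subdomain(workspace_name: str) -> str:
--     """Generate valid subdomain from workspace name"""
--     if not workspace_name:
--         return 'typeform-migration'
--
--     # Clean and format
--     subdomain = workspace_name.lower()
--     subdomain = ''.join(c if c.isalnum() or c == '-' else '-' for c in subdomain)
--     subdomain = '-'.join(filter(None, subdomain.split('-')))
--
--     # Ensure it starts with a letter
--     if subdomain and not subdomain[0].isalpha():
--         subdomain = 'tf-' + subdomain
--
--     # Limit length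
--     if len(subdomain) > 30:
--         subdomain = subdomain[:30]
--
--     return subdomain or 'typeform-migration'
-- ===== SOURCE B (Python) =====
-- def _generate_subdomain(workspace_name: str) -> str:
--     out = []
--     pending = False
--     for c in workspace_name.lower():
--         if c.isalnum():
--             if pending and out:
--                 out.append('-')
--             out.append(c)
--             pending = False
--         else:
--             pending = True
--     sub = ''.join(out)
--     if sub and not sub[0].isalpha():
--         sub = 'tf-' + sub
--     return sub[:30] if len(sub) > 30 else (sub or 'typeform-migration')
-- ===== Notes on version B (the rewrite author's own statement) =====
-- stated objective: simpler
-- what changed: Replaces the three-stage pipeline (per-char map to '-', split('-'), filter, join) with one explicit pass that appends alnum chars and flushes a single pending '-' only between words, so no intermediate list of fragments is built.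
import Mathlib
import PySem

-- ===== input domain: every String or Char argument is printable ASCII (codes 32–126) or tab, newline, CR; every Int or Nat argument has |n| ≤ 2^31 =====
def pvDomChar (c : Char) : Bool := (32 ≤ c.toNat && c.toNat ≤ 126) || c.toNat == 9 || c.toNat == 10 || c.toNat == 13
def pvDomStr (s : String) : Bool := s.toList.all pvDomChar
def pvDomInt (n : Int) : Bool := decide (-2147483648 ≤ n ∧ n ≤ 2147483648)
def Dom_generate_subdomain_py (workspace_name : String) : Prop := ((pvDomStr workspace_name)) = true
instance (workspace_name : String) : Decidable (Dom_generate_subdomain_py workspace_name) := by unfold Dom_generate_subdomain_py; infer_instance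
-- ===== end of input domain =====

-- B replaces A's map/split/filter/join pipeline with one pass carrying a pending-separator flag; same return value, no speed claim.

-- ===== PORT A =====
def generate_subdomain_py (workspace_name : String) : String :=
  if workspace_name = "" then "typeform-migration"
  else
    let sub := PySem.Chars.lower workspace_name.toList
    let sub := sub.map (fun c => if PySem.Chars.isalnum c || c == '-' then c else '-')
    let sub := PySem.Chars.join ['-'] ((PySem.Chars.splitOn sub ['-']).filter (fun p => !p.isEmpty))
    let sub := match sub with
      | [] => sub
      | c :: _ => if PySem.Chars.isalpha c then sub else ['t','f','-'] ++ sub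
    -- subdomain[:30] with a literal nonnegative bound = take 30 (exact)
    let sub := if sub.length > 30 then sub.take 30 else sub
    if sub = [] then "typeform-migration" else String.ofList sub

-- ===== PORT B =====
-- the loop: out-accumulator plus 'pending separator' flag
def altGo : List Char → Bool → List Char → List Char
  | [], _, out => out
  | c :: rest, pending, out =>
    if PySem.Chars.isalnum c then
      let out := if pending && !out.isEmpty then out ++ ['-'] else out
      altGo rest false (out ++ [c])
    else altGo rest true out

def generate_subdomain_py_alt (workspace_name : String) : String :=
  let sub := altGo (PySem.Chars.lower workspace_name.toList) false []
  let sub := match sub with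
    | [] => sub
    | c :: _ => if PySem.Chars.isalpha c then sub else ['t','f','-'] ++ sub
  -- sub[:30] with a literal nonnegative bound = take 30 (exact)
  if sub.length > 30 then String.ofList (sub.take 30)
  else if sub = [] then "typeform-migration" else String.ofList sub

-- ===== PRECONDITION & SPEC =====
def Spec_generate_subdomain_py (workspace_name : String) (out : String) : Prop := out = generate_subdomain_py_alt workspace_name
instance (workspace_name : String) (out : String) : Decidable (Spec_generate_subdomain_py workspace_name out) := by unfold Spec_generate_subdomain_py; infer_instance

-- ===== CLAIM (what is proved, stated in full; the proofs are below) =====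
def Claim_equal_generate_subdomain_py : Prop := ∀ (workspace_name : String), Dom_generate_subdomain_py workspace_name → Spec_generate_subdomain_py workspace_name (generate_subdomain_py workspace_name)

-- ===== LEMMAS AND PROOFS =====

-- reference split: simple accumulator form of splitting on '-'
def mySplit (pre : List Char) : List Char → List (List Char)
  | [] => [pre]
  | c :: r => if c = '-' then pre :: mySplit [] r else mySplit (pre ++ [c]) r

-- prepend a prefix to the head part
def consHead (pre : List Char) : List (List Char) → List (List Char)
  | [] => [pre]
  | h :: t => (pre ++ h) :: t

-- reference collapse, three states: initial (output empty), inside word, separator pending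
mutual
def fI : List Char → List Char
  | [] => []
  | c :: r => if PySem.Chars.isalnum c then c :: fW r else fI r
def fW : List Char → List Char
  | [] => []
  | c :: r => if PySem.Chars.isalnum c then c :: fW r else fS r
def fS : List Char → List Char
  | [] => []
  | c :: r => if PySem.Chars.isalnum c then '-' :: c :: fW r else fS r
end

theorem go_spec (l : List Char) : ∀ (fuel : Nat) (cur : List Char) (acc : List (List Char)),
    l.length < fuel →
    PySem.Chars.splitOn.go ['-'] fuel l cur acc = acc.reverse ++ mySplit cur.reverse l := by
  induction l with
  | nil =>
    intro fuel cur acc h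
    match fuel, h with
    | fuel + 1, _ => simp [PySem.Chars.splitOn.go, mySplit]
  | cons c rest ih =>
    intro fuel cur acc h
    match fuel, h with
    | fuel + 1, h =>
      by_cases hc : c = '-'
      · subst hc
        have hp : List.isPrefixOf ['-'] ('-' :: rest) = true := by
          simp [List.isPrefixOf]
        simp only [PySem.Chars.splitOn.go, hp, if_pos, List.length_cons,
          List.length_nil, List.drop_succ_cons, List.drop_zero]
        rw [ih fuel [] (cur.reverse :: acc) (by simpa using Nat.lt_of_succ_lt_succ h)]
        simp [mySplit]
      · have hp : List.isPrefixOf ['-'] (c :: rest) = false := by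
          simp [List.isPrefixOf]
          exact fun he => absurd he.symm hc
        simp only [PySem.Chars.splitOn.go, hp, Bool.false_eq_true, if_neg, not_false_iff]
        rw [ih fuel (c :: cur) acc (by simpa using Nat.lt_of_succ_lt_succ h)]
        simp [mySplit, hc]

theorem splitOn_eq (m : List Char) : PySem.Chars.splitOn m ['-'] = mySplit [] m := by
  rw [PySem.Chars.splitOn, go_spec m (m.length + 1) [] [] (by omega)]
  simp

theorem consHead_consHead (p q : List Char) (L : List (List Char)) :
    consHead p (consHead q L) = consHead (p ++ q) L := by
  cases L <;> simp [consHead]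

theorem mySplit_pre (l : List Char) : ∀ pre, mySplit pre l = consHead pre (mySplit [] l) := by
  induction l with
  | nil => intro pre; simp [mySplit, consHead]
  | cons c r ih =>
    intro pre
    by_cases hc : c = '-'
    · subst hc; simp [mySplit, consHead]
    · simp only [mySplit, if_neg hc, List.nil_append]
      rw [ih (pre ++ [c]), ih [c], consHead_consHead]

theorem fS_eq (r : List Char) : fS r = if fI r = [] then [] else '-' :: fI r := by
  induction r with
  | nil => simp [fS, fI]
  | cons c r ih =>
    by_cases hc : PySem.Chars.isalnum c
    · simp [fS, fI, hc]
    · simp [fS, fI, hc, ih]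

-- join is nonempty when its first part is
theorem join_ne_nil (q : List Char) (qs : List (List Char)) (hq : q ≠ []) :
    PySem.Chars.join ['-'] (q :: qs) ≠ [] := by
  cases qs with
  | nil => simpa [PySem.Chars.join_singleton] using hq
  | cons b t => simp [PySem.Chars.join_cons_cons, hq]

-- the A-side pipeline on the mapped list, characterized by fI / fW
theorem main_lemma (ls : List Char) :
    (PySem.Chars.join ['-'] ((mySplit [] (ls.map (fun c => if PySem.Chars.isalnum c || c == '-' then c else '-'))).filter (fun p => !p.isEmpty)) = fI ls)
    ∧ ∀ pre : List Char, pre ≠ [] →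
      PySem.Chars.join ['-'] ((consHead pre (mySplit [] (ls.map (fun c => if PySem.Chars.isalnum c || c == '-' then c else '-')))).filter (fun p => !p.isEmpty)) = pre ++ fW ls := by
  induction ls with
  | nil =>
    constructor
    · simp [mySplit, PySem.Chars.join_nil, fI]
    · intro pre hpre
      simp [mySplit, consHead, PySem.Chars.join_singleton, hpre, fW]
  | cons c r ih =>
    by_cases ha : PySem.Chars.isalnum c = true
    · have hcd : c ≠ '-' := by
        intro he; subst he; revert ha; decide
      have hg : (if PySem.Chars.isalnum c || c == '-' then c else '-') = c := by
        simp [ha]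
      have hsplit : mySplit [] ((c :: r).map (fun c => if PySem.Chars.isalnum c || c == '-' then c else '-'))
          = consHead [c] (mySplit [] (r.map (fun c => if PySem.Chars.isalnum c || c == '-' then c else '-'))) := by
        simp only [List.map_cons, hg, mySplit, if_neg hcd, List.nil_append]
        exact mySplit_pre _ [c]
      constructor
      · rw [hsplit, ih.2 [c] (by simp)]
        simp [fI, ha]
      · intro pre hpre
        rw [hsplit, consHead_consHead, ih.2 (pre ++ [c]) (by simp)]
        simp [fW, ha]
    · have hg : (if PySem.Chars.isalnum c || c == '-' then c else '-') = '-' := by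
        by_cases hd : c = '-' <;> simp [ha, hd]
      have hsplit : mySplit [] ((c :: r).map (fun c => if PySem.Chars.isalnum c || c == '-' then c else '-'))
          = [] :: mySplit [] (r.map (fun c => if PySem.Chars.isalnum c || c == '-' then c else '-')) := by
        rw [List.map_cons, hg]
        simp [mySplit]
      constructor
      · rw [hsplit]
        simp only [List.filter_cons, List.isEmpty_nil, Bool.not_true, Bool.false_eq_true, if_neg,
          not_false_iff]
        rw [ih.1]
        simp [fI, ha]
      · intro pre hpre
        rw [hsplit]
        simp only [consHead, List.append_nil, List.filter_cons,
          (by simpa [List.isEmpty_iff] using hpre : pre.isEmpty = false), Bool.not_false, if_pos]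
        have hfS : fW (c :: r) = fS r := by simp [fW, ha]
        rw [hfS, fS_eq, ← ih.1]
        cases hq : (mySplit [] (r.map (fun c => if PySem.Chars.isalnum c || c == '-' then c else '-'))).filter (fun p => !p.isEmpty) with
        | nil => simp [PySem.Chars.join_singleton, PySem.Chars.join_nil]
        | cons q qs =>
          have hqne : q ≠ [] := by
            have := List.of_mem_filter (l := mySplit [] (r.map (fun c => if PySem.Chars.isalnum c || c == '-' then c else '-'))) (p := fun p => !p.isEmpty) (a := q) (by rw [hq]; exact List.mem_cons_self)
            simpa [List.isEmpty_iff] using this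
          rw [PySem.Chars.join_cons_cons]
          simp [join_ne_nil q qs hqne]

theorem altGo_eq (ls : List Char) : ∀ (pending : Bool) (out : List Char),
    altGo ls pending out = out ++ (if out = [] then fI ls else if pending then fS ls else fW ls) := by
  induction ls with
  | nil => intro p out; simp only [altGo, fI, fS, fW]; split_ifs <;> simp
  | cons c r ih =>
    intro p out
    by_cases ha : PySem.Chars.isalnum c = true
    · simp only [altGo, ha, if_pos]
      by_cases ho : out = []
      · subst ho
        simp only [List.isEmpty_nil, Bool.not_true, Bool.and_false, Bool.false_eq_true, if_neg,
          not_false_iff, List.nil_append, if_pos]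
        rw [ih false [c]]
        simp [fI, ha]
      · have hne : out.isEmpty = false := by simpa [List.isEmpty_iff] using ho
        cases p with
        | false =>
          simp only [Bool.false_and, Bool.false_eq_true, if_neg, not_false_iff]
          rw [ih false (out ++ [c])]
          simp [fW, ha, ho]
        | true =>
          simp only [hne, Bool.not_false, Bool.and_true, if_pos]
          rw [ih false ((out ++ ['-']) ++ [c])]
          simp [fS, ha, ho]
    · simp only [altGo, ha, Bool.false_eq_true, if_neg, not_false_iff]
      rw [ih true out]
      by_cases ho : out = [] <;> cases p <;> simp [fI, fS, fW, ha, ho]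

-- the common tail after the 'tf-' step: A's truncate-then-default vs B's conditional return
theorem tail_eq (u : List Char) :
    (if (if u.length > 30 then u.take 30 else u) = [] then "typeform-migration"
     else String.ofList (if u.length > 30 then u.take 30 else u))
    = (if u.length > 30 then String.ofList (u.take 30)
       else if u = [] then "typeform-migration" else String.ofList u) := by
  by_cases hl : u.length > 30
  · have hne : u.take 30 ≠ [] := by
      simp only [ne_eq, List.take_eq_nil_iff, not_or]
      exact ⟨by omega, by intro h; subst h; simp at hl⟩
    simp [hl, hne]
  · simp [hl]

-- ===== VERDICT (by name: the statement is the Claim_ definition above) =====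
theorem generate_subdomain_py_spec : Claim_equal_generate_subdomain_py := by
  intro s _
  show generate_subdomain_py s = generate_subdomain_py_alt s
  by_cases hs : s = ""
  · subst hs; rfl
  · have hB : altGo (PySem.Chars.lower s.toList) false [] = fI (PySem.Chars.lower s.toList) := by
      simpa using altGo_eq (PySem.Chars.lower s.toList) false []
    unfold generate_subdomain_py generate_subdomain_py_alt
    rw [if_neg hs]
    simp only [splitOn_eq, (main_lemma (PySem.Chars.lower s.toList)).1, hB]
    exact tail_eq _
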